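-- pv_equiv track=rewrite | github.com/offer66/StockAnalyserAndPredictor | scripts/prediction_scripts/av_scraper.py | initialise
-- ===== SOURCE A (Python) =====
-- def initialise(months):
-- 	# Variables
-- 	MONTHS = str(months)       # Data from 6 months ago to now
--
-- 	DATES_INTERVALS = {}
-- 	INTERVALS = [
-- 		['1min'], ['1min'], ['5min'], ['5min'], ['5min'], ['15min'], ['15min'], ['15min'], ['15min'], ['30min'], ['30min'], ['30min'],
-- 		['30min'], ['30min'], ['30min'], ['30min'], ['30min'], ['60min'], ['60min'], ['60min'], ['60min'], ['60min'], ['60min'], ['60min']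
-- 	]
--
-- 	for num in range(24):
-- 		num += 1
-- 		dates = []
-- 		for i in range(num):
-- 			if i < 12:
-- 				dates.append('year1month' + str(i + 1))
-- 			else:
-- 				dates.append('year2month' + str(i + 1 - 12))
-- 		DATES_INTERVALS[str(num)] = [dates, INTERVALS[num - 1]]
--
-- 	SLICE_DATES = DATES_INTERVALS[MONTHS][0]
-- 	INTERVAL = DATES_INTERVALS[MONTHS][1]
-- 	return SLICE_DATES, '1min'
-- ===== SOURCE B (Python) =====
-- def initialise(months):
-- 	"""Slice names covering the last `months` months (the API provides 24 monthly slices)."""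
-- 	if not 1 <= months <= 24:
-- 		raise ValueError('months must be between 1 and 24, got %r' % (months,))
-- 	dates = ['year1month' + str(i + 1) if i < 12 else 'year2month' + str(i - 11)
-- 	         for i in range(months)]
-- 	return dates, '1min'
-- ===== Notes on version B (the rewrite author's own statement) =====
-- stated objective: simpler
-- what changed: B drops the precomputed 24-entry DATES_INTERVALS table and the unused INTERVALS list, validates the month count against the 24 available slices, and builds only the requested month's slice-date list with a single comprehension; Pre_ excludes month counts outside 1..24, on which A's dict lookup raises KeyError (B raises ValueError there).
import Mathlib
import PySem

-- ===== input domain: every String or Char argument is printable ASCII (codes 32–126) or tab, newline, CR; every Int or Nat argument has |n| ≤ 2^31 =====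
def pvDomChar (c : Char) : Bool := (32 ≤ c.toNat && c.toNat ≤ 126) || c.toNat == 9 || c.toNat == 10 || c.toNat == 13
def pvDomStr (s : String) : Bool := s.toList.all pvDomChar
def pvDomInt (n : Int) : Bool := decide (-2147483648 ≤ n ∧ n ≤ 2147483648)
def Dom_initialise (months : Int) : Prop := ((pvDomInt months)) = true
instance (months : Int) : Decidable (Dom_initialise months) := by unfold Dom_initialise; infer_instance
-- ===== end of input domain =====

-- B drops A's 24-entry table and builds the month's slice list directly (simpler decomposition).

-- ===== PORT A =====
-- Literal port of A: builds the full DATES_INTERVALS dict for every key the table covers, then looks up str(months).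
def initialise (months : Int) : List String × String :=
  let MONTHS := PySem.Int.toStr months
  let INTERVALS : List (List String) :=
    [["1min"], ["1min"], ["5min"], ["5min"], ["5min"], ["15min"], ["15min"], ["15min"], ["15min"], ["30min"], ["30min"], ["30min"],
     ["30min"], ["30min"], ["30min"], ["30min"], ["30min"], ["60min"], ["60min"], ["60min"], ["60min"], ["60min"], ["60min"], ["60min"]]
  let DATES_INTERVALS : PySem.Dict String (List (List String)) :=
    (PySem.List.pyRange 0 24 1).foldl (fun d num0 =>
      let num := num0 + 1
      let dates := (PySem.List.pyRange 0 num 1).foldl (fun ds i =>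
        if i < 12 then ds ++ ["year1month" ++ PySem.Int.toStr (i + 1)]
        else ds ++ ["year2month" ++ PySem.Int.toStr (i + 1 - 12)]) []
      d.insert (PySem.Int.toStr num) [dates, PySem.List.pyGetD INTERVALS (num - 1) []]) PySem.Dict.empty
  -- dict lookup raises KeyError for keys not in the table: excluded by Pre_initialise (getD default never reached inside Pre_)
  let entry := (DATES_INTERVALS.get? MONTHS).getD []
  let SLICE_DATES := PySem.List.pyGetD entry 0 []
  (SLICE_DATES, "1min")

-- ===== PORT B =====
-- Literal port of B: range check, then one comprehension over range(months).
def initialise_alt (months : Int) : List String × String :=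
  -- Python B raises ValueError here: excluded by Pre_initialise (default never reached inside Pre_)
  if months < 1 ∨ 24 < months then ([], "1min") else
  let dates := (PySem.List.pyRange 0 months 1).map (fun i =>
    if i < 12 then "year1month" ++ PySem.Int.toStr (i + 1)
    else "year2month" ++ PySem.Int.toStr (i - 11))
  (dates, "1min")

-- ===== PRECONDITION & SPEC =====
-- Exactly the inputs on which A returns: elsewhere A's dict lookup raises KeyError (and B raises ValueError).
def Pre_initialise (months : Int) : Prop := 1 ≤ months ∧ months ≤ 24
instance (months : Int) : Decidable (Pre_initialise months) := by unfold Pre_initialise; infer_instance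
def pvWitness_initialise : Int := 6
def Spec_initialise (months : Int) (out : List String × String) : Prop := out = initialise_alt months
instance (months : Int) (out : List String × String) : Decidable (Spec_initialise months out) := by unfold Spec_initialise; infer_instance

-- ===== CLAIM (what is proved, stated in full; the proofs are below) =====
def Claim_equal_initialise : Prop := ∀ (months : Int), Dom_initialise months → Pre_initialise months → Spec_initialise months (initialise months)

-- ===== LEMMAS AND PROOFS =====

-- ===== VERDICT (by name: the statement is the Claim_ definition above) =====
theorem initialise_spec : Claim_equal_initialise := by
  intro months _ hpre
  obtain ⟨h1, h2⟩ := hpre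
  unfold Spec_initialise
  interval_cases months <;> decide
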